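-- pv_equiv track=rewrite | github.com/ksumini/Algorithm-Study2.0 | Programmers/아방가르드 타일링/jisu.py | solution_tle
-- ===== SOURCE A (Python) =====
-- DIV = 1_000_000_007
--
-- def solution_tle(n: int) -> int:
--     """
--     설명에 기반한 풀이, 최적화가 필요
--     """
--     dp = [0, 1, 3, 10]
--
--     if n < 4:
--         return dp[n]
--
--     for i in range(4, n + 1):
--         tmp_answer = 4 if i % 3 == 0 else 2
--         for j in range(i - 1, 0, -1):
--             right_blocks = i - j  # j : left_blocks
--
--             if right_blocks == 1:
--                 tmp_answer += dp[j] % DIV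
--             elif right_blocks == 3:
--                 tmp_answer += dp[j] * 5 % DIV
--             elif right_blocks % 3 == 0:
--                 tmp_answer += dp[j] * 4 % DIV
--             else:
--                 tmp_answer += dp[j] * 2 % DIV
--
--         dp.append(tmp_answer % DIV)
--
--     return dp[-1] % DIV
-- ===== SOURCE B (Python) =====
-- DIV = 1_000_000_007
--
--
-- def solution_tle(n: int) -> int:
--     # O(n): the per-row coefficient pattern (1, 2, 5, 2, 2, 4, 2, 2, 4, ...)
--     # is periodic with period 3 past the first three positions, so the raw
--     # row sum u_i can be updated from u_{i-3} with O(1) boundary corrections.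
--     table = [0, 1, 3, 10, 23, 62, 170]
--     if n < 7:
--         return table[n] % DIV
--     # u1,u2,u3 = raw (pre-mod) row sums for i-1, i-2, i-3 (here i = 7)
--     u1, u2, u3 = 170, 62, 23
--     # g1..g6 = dp values for i-1 .. i-6
--     g1, g2, g3, g4, g5, g6 = 170, 62, 23, 10, 3, 1
--     for _ in range(7, n + 1):
--         u = (u3 + g1 + g2 * 2 % DIV + g3 * 5 % DIV
--              + g4 * 2 % DIV - g4 + g6 * 4 % DIV - g6 * 5 % DIV)
--         d = u % DIV
--         u1, u2, u3 = u, u1, u2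
--         g1, g2, g3, g4, g5, g6 = d, g1, g2, g3, g4, g5
--     return g1
-- ===== Notes on version B (the rewrite author's own statement) =====
-- stated objective: faster
-- what changed: Replaced the quadratic inner re-scan of all previous dp values by an O(1) update per row: the coefficient pattern is periodic mod 3, so the raw row sum u_i is obtained from u_{i-3} plus six boundary terms, keeping only a sliding window of the last 6 dp values and last 3 raw sums.
-- outside the precondition, e.g. on solution_tle(-1): A returns 10, B returns 170; on solution_tle(-5): A raises IndexError, B returns 3
import Mathlib
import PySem

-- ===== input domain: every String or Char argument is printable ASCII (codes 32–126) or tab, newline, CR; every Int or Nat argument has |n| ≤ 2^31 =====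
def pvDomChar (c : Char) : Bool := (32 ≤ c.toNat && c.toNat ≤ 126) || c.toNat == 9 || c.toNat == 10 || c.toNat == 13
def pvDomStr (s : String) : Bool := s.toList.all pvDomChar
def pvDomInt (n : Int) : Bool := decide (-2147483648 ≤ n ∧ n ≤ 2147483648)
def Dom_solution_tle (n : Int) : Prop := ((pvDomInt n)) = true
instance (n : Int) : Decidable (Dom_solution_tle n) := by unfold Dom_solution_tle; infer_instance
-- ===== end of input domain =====

-- B replaces A's quadratic inner re-scan by an O(1)-per-row update (the coefficient
-- pattern is periodic mod 3, so the raw row sum follows from the one three rows back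
-- plus six boundary terms); objective: faster (asymptotic, O(n) vs O(n^2)).

def pvDIV : Int := 1000000007

-- ===== PORT A =====
-- dp[j] / dp[-1] accesses are ported with pyGetD (default never used: the indices are
-- always in range — j ∈ [1, i-1] with len dp = i, and dp is nonempty at dp[-1]).
def solution_tle (n : Int) : Int :=
  let dp : List Int := [0, 1, 3, 10]
  if n < 4 then (PySem.List.pyGet? dp n).getD 0
  else
    let dp := (PySem.List.pyRange 4 (n + 1) 1).foldl (fun dp i =>
      let tmp : Int := if PySem.Int.mod i 3 = 0 then 4 else 2
      let tmp := (PySem.List.pyRange (i - 1) 0 (-1)).foldl (fun acc j =>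
        let rb := i - j
        if rb = 1 then acc + PySem.Int.mod (PySem.List.pyGetD dp j 0) pvDIV
        else if rb = 3 then acc + PySem.Int.mod (PySem.List.pyGetD dp j 0 * 5) pvDIV
        else if PySem.Int.mod rb 3 = 0 then acc + PySem.Int.mod (PySem.List.pyGetD dp j 0 * 4) pvDIV
        else acc + PySem.Int.mod (PySem.List.pyGetD dp j 0 * 2) pvDIV) tmp
      dp ++ [PySem.Int.mod tmp pvDIV]) dp
    PySem.Int.mod (PySem.List.pyGetD dp (-1) 0) pvDIV

-- ===== PORT B =====
-- state: (u1, u2, u3, g1, g2, g3, g4, g5, g6) = raw row sums for i-1, i-2, i-3 and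
-- dp values for i-1 .. i-6.
def solution_tle_alt (n : Int) : Int :=
  let table : List Int := [0, 1, 3, 10, 23, 62, 170]
  if n < 7 then PySem.Int.mod ((PySem.List.pyGet? table n).getD 0) pvDIV
  else
    let s := (PySem.List.pyRange 7 (n + 1) 1).foldl
      (fun s _ =>
        let u := s.2.2.1 + s.2.2.2.1 + PySem.Int.mod (s.2.2.2.2.1 * 2) pvDIV
          + PySem.Int.mod (s.2.2.2.2.2.1 * 5) pvDIV
          + PySem.Int.mod (s.2.2.2.2.2.2.1 * 2) pvDIV - s.2.2.2.2.2.2.1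
          + PySem.Int.mod (s.2.2.2.2.2.2.2.2 * 4) pvDIV
          - PySem.Int.mod (s.2.2.2.2.2.2.2.2 * 5) pvDIV
        let d := PySem.Int.mod u pvDIV
        (u, s.1, s.2.1, d, s.2.2.2.1, s.2.2.2.2.1, s.2.2.2.2.2.1, s.2.2.2.2.2.2.1,
          s.2.2.2.2.2.2.2.1))
      ((170, 62, 23, 170, 62, 23, 10, 3, 1) :
        Int × Int × Int × Int × Int × Int × Int × Int × Int)
    s.2.2.2.1

-- ===== PRECONDITION & SPEC =====
-- Pre_ excludes negative n: there A raises IndexError (n ≤ -5) or returns a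
-- negative-index wraparound artefact of its 4-element seed list (-4 ≤ n ≤ -1)
-- which B's longer base table cannot be expected to match.
def Pre_solution_tle (n : Int) : Prop := 0 ≤ n
instance (n : Int) : Decidable (Pre_solution_tle n) := by unfold Pre_solution_tle; infer_instance
def pvWitness_solution_tle : Int := 9
def Spec_solution_tle (n : Int) (out : Int) : Prop := out = solution_tle_alt n
instance (n : Int) (out : Int) : Decidable (Spec_solution_tle n out) := by unfold Spec_solution_tle; infer_instance

-- ===== CLAIM (what is proved, stated in full; the proofs are below) =====
def Claim_equal_solution_tle : Prop := ∀ (n : Int), Dom_solution_tle n → Pre_solution_tle n → Spec_solution_tle n (solution_tle n)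

-- ===== LEMMAS AND PROOFS =====

-- A's inner loop as a standalone function (definitionally the loop body of the port).
def rowA (dp : List Int) (i : Int) : Int :=
  (PySem.List.pyRange (i - 1) 0 (-1)).foldl (fun acc j =>
    let rb := i - j
    if rb = 1 then acc + PySem.Int.mod (PySem.List.pyGetD dp j 0) pvDIV
    else if rb = 3 then acc + PySem.Int.mod (PySem.List.pyGetD dp j 0 * 5) pvDIV
    else if PySem.Int.mod rb 3 = 0 then acc + PySem.Int.mod (PySem.List.pyGetD dp j 0 * 4) pvDIV
    else acc + PySem.Int.mod (PySem.List.pyGetD dp j 0 * 2) pvDIV)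
    (if PySem.Int.mod i 3 = 0 then (4 : Int) else 2)

def buildA : Nat → List Int
  | 0 => [0, 1, 3, 10]
  | k + 1 => buildA k ++ [PySem.Int.mod (rowA (buildA k) ((k : Int) + 4)) pvDIV]

def Gn (m : Nat) : Int := (buildA m).getD m 0

def GI (j : Int) : Int := Gn j.toNat

-- the per-term coefficient of A's inner loop
def cf (d rb : Int) : Int :=
  if rb = 1 then PySem.Int.mod d pvDIV
  else if rb = 3 then PySem.Int.mod (d * 5) pvDIV
  else if PySem.Int.mod rb 3 = 0 then PySem.Int.mod (d * 4) pvDIV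
  else PySem.Int.mod (d * 2) pvDIV

-- the raw (pre-mod) row sum
def Traw (i : Int) : Int :=
  (if PySem.Int.mod i 3 = 0 then (4 : Int) else 2)
    + ((PySem.List.pyRange 1 i 1).map (fun j => cf (GI j) (i - j))).sum

theorem length_buildA (k : Nat) : (buildA k).length = k + 4 := by
  induction k with
  | zero => rfl
  | succ k ih => simp [buildA, ih]

theorem buildA_prefix (k k' : Nat) (h : k ≤ k') : buildA k <+: buildA k' := by
  induction k' with
  | zero => simp_all
  | succ k' ih =>
    rcases Nat.lt_or_ge k (k' + 1) with h' | h'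
    · exact (ih (by omega)).trans ⟨_, rfl⟩
    · have : k = k' + 1 := by omega
      subst this; exact List.prefix_rfl

theorem getD_buildA (k m : Nat) (h : m ≤ k + 3) : (buildA k).getD m 0 = Gn m := by
  have hk : m < (buildA k).length := by rw [length_buildA]; omega
  have hm : m < (buildA m).length := by rw [length_buildA]; omega
  unfold Gn
  rcases le_total k m with hle | hle
  · have hp := buildA_prefix k m hle
    rw [List.getD_eq_getElem _ _ hk, List.getD_eq_getElem _ _ hm, hp.getElem hk]; rfl

  · have hp := buildA_prefix m k hle
    rw [List.getD_eq_getElem _ _ hk, List.getD_eq_getElem _ _ hm, hp.getElem hm]; rfl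


theorem rowA_sum (dp : List Int) (i : Int) :
    rowA dp i = (if PySem.Int.mod i 3 = 0 then (4 : Int) else 2)
      + ((PySem.List.pyRange 1 i 1).map (fun j => cf (PySem.List.pyGetD dp j 0) (i - j))).sum := by
  unfold rowA
  have hbody : (fun (acc j : Int) =>
      let rb := i - j
      if rb = 1 then acc + PySem.Int.mod (PySem.List.pyGetD dp j 0) pvDIV
      else if rb = 3 then acc + PySem.Int.mod (PySem.List.pyGetD dp j 0 * 5) pvDIV
      else if PySem.Int.mod rb 3 = 0 then acc + PySem.Int.mod (PySem.List.pyGetD dp j 0 * 4) pvDIV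
      else acc + PySem.Int.mod (PySem.List.pyGetD dp j 0 * 2) pvDIV)
      = fun acc j => acc + cf (PySem.List.pyGetD dp j 0) (i - j) := by
    funext acc j
    simp only [cf]
    split_ifs <;> rfl
  rw [hbody, PySem.List.foldl_add]
  have hrev : PySem.List.pyRange (i - 1) 0 (-1) = (PySem.List.pyRange 1 i 1).reverse := by
    rw [PySem.List.pyRange_neg_one_eq_reverse]
    norm_num
  rw [hrev, List.map_reverse, List.sum_reverse]

theorem row_eq_T (m : Nat) : rowA (buildA m) ((m : Int) + 4) = Traw ((m : Int) + 4) := by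
  rw [rowA_sum]
  unfold Traw
  congr 1
  congr 1
  apply List.map_congr_left
  intro j hj
  rw [PySem.List.mem_pyRange_one] at hj
  have h0 : (0 : Int) ≤ j := by omega
  rw [PySem.List.pyGetD_of_nonneg (h := h0)]
  have hle : j.toNat ≤ m + 3 := by omega
  rw [getD_buildA m j.toNat hle]
  rfl

theorem Gn_succ (m : Nat) : Gn (m + 4) = PySem.Int.mod (Traw ((m : Int) + 4)) pvDIV := by
  rw [← getD_buildA (m + 1) (m + 4) (by omega)]
  have hl : (buildA m).length = m + 4 := length_buildA m
  have hstep : buildA (m + 1)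
      = buildA m ++ [PySem.Int.mod (rowA (buildA m) ((m : Int) + 4)) pvDIV] := rfl
  rw [hstep, ← row_eq_T m]
  simp [List.getD_eq_getElem?_getD, hl]

theorem Gn_bounds (m : Nat) : 0 ≤ Gn m ∧ Gn m < pvDIV := by
  rcases m with _ | _ | _ | _ | m
  · decide
  · decide
  · decide
  · decide
  · rw [show m + 1 + 1 + 1 + 1 = m + 4 by omega, Gn_succ,
      PySem.Int.mod_eq_emod_of_pos (by norm_num [pvDIV])]
    exact ⟨Int.emod_nonneg _ (by norm_num [pvDIV]), Int.emod_lt_of_pos _ (by norm_num [pvDIV])⟩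

theorem GI_bounds (j : Int) : 0 ≤ GI j ∧ GI j < pvDIV := Gn_bounds _

theorem cf_one (d : Int) (h0 : 0 ≤ d) (h1 : d < pvDIV) : cf d 1 = d := by
  unfold cf
  rw [if_pos rfl, PySem.Int.mod_eq_emod_of_pos (by norm_num [pvDIV])]
  exact Int.emod_eq_of_lt h0 h1

theorem cf_two (d : Int) : cf d 2 = PySem.Int.mod (d * 2) pvDIV := by
  unfold cf
  rw [if_neg (by norm_num), if_neg (by norm_num), if_neg (by decide)]

theorem cf_three (d : Int) : cf d 3 = PySem.Int.mod (d * 5) pvDIV := by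
  unfold cf
  rw [if_neg (by norm_num), if_pos rfl]

theorem cf_four (d : Int) : cf d 4 = PySem.Int.mod (d * 2) pvDIV := by
  unfold cf
  rw [if_neg (by norm_num), if_neg (by norm_num), if_neg (by decide)]

theorem cf_five (d : Int) : cf d 5 = PySem.Int.mod (d * 2) pvDIV := by
  unfold cf
  rw [if_neg (by norm_num), if_neg (by norm_num), if_neg (by decide)]

theorem cf_six (d : Int) : cf d 6 = PySem.Int.mod (d * 4) pvDIV := by
  unfold cf
  rw [if_neg (by norm_num), if_neg (by norm_num), if_pos (by decide)]

theorem T_step (i : Int) (h : 7 ≤ i) :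
    Traw i = Traw (i - 3) + GI (i - 1) + PySem.Int.mod (GI (i - 2) * 2) pvDIV
      + PySem.Int.mod (GI (i - 3) * 5) pvDIV
      + (PySem.Int.mod (GI (i - 4) * 2) pvDIV - GI (i - 4))
      + (PySem.Int.mod (GI (i - 6) * 4) pvDIV - PySem.Int.mod (GI (i - 6) * 5) pvDIV) := by
  unfold Traw
  have hbase : (if PySem.Int.mod (i - 3) 3 = 0 then (4 : Int) else 2)
      = (if PySem.Int.mod i 3 = 0 then (4 : Int) else 2) := by
    rw [PySem.Int.mod_eq_emod_of_pos (by norm_num), PySem.Int.mod_eq_emod_of_pos (by norm_num)]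
    have : (i - 3) % 3 = i % 3 := by omega
    rw [this]
  have h1 : PySem.List.pyRange 1 i 1
      = PySem.List.pyRange 1 (i - 6) 1 ++ PySem.List.pyRange (i - 6) i 1 :=
    PySem.List.pyRange_one_append 1 (i - 6) i (by omega) (by omega)
  have h2 : PySem.List.pyRange (i - 6) i 1 = [i - 6, i - 5, i - 4, i - 3, i - 2, i - 1] := by
    rw [PySem.List.pyRange_one_cons (by omega), show i - 6 + 1 = i - 5 by ring,
        PySem.List.pyRange_one_cons (by omega), show i - 5 + 1 = i - 4 by ring,
        PySem.List.pyRange_one_cons (by omega), show i - 4 + 1 = i - 3 by ring,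
        PySem.List.pyRange_one_cons (by omega), show i - 3 + 1 = i - 2 by ring,
        PySem.List.pyRange_one_cons (by omega), show i - 2 + 1 = i - 1 by ring,
        PySem.List.pyRange_one_cons (by omega), show i - 1 + 1 = i by ring,
        PySem.List.pyRange_one_eq_nil (le_refl i)]
  have h3b : PySem.List.pyRange (i - 6) (i - 3) 1 = [i - 6, i - 5, i - 4] := by
    rw [PySem.List.pyRange_one_cons (by omega), show i - 6 + 1 = i - 5 by ring,
        PySem.List.pyRange_one_cons (by omega), show i - 5 + 1 = i - 4 by ring,
        PySem.List.pyRange_one_cons (by omega), show i - 4 + 1 = i - 3 by ring,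
        PySem.List.pyRange_one_eq_nil (le_refl (i - 3))]
  have h3 : PySem.List.pyRange 1 (i - 3) 1
      = PySem.List.pyRange 1 (i - 6) 1 ++ [i - 6, i - 5, i - 4] := by
    rw [PySem.List.pyRange_one_append 1 (i - 6) (i - 3) (by omega) (by omega), h3b]
  have hS : ((PySem.List.pyRange 1 (i - 6) 1).map (fun j => cf (GI j) (i - j))).sum
      = ((PySem.List.pyRange 1 (i - 6) 1).map (fun j => cf (GI j) (i - 3 - j))).sum := by
    apply congrArg
    apply List.map_congr_left
    intro j hj
    rw [PySem.List.mem_pyRange_one] at hj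
    unfold cf
    simp only [PySem.Int.mod_eq_emod_of_pos (show (0 : Int) < 3 by norm_num)]
    split_ifs <;> first | rfl | omega
  rw [h1, h3, h2]
  simp only [List.map_append, List.sum_append, List.map_cons, List.map_nil, List.sum_cons,
    List.sum_nil, hbase, hS]
  rw [show i - (i - 6) = 6 by ring, show i - (i - 5) = 5 by ring, show i - (i - 4) = 4 by ring,
      show i - (i - 3) = 3 by ring, show i - (i - 2) = 2 by ring, show i - (i - 1) = 1 by ring,
      show i - 3 - (i - 6) = 3 by ring, show i - 3 - (i - 5) = 2 by ring,
      show i - 3 - (i - 4) = 1 by ring]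
  rw [cf_one _ (GI_bounds (i - 1)).1 (GI_bounds (i - 1)).2,
      cf_one _ (GI_bounds (i - 4)).1 (GI_bounds (i - 4)).2,
      cf_two, cf_two, cf_three, cf_three, cf_four, cf_five, cf_six]
  ring

def stepA (dp : List Int) (i : Int) : List Int := dp ++ [PySem.Int.mod (rowA dp i) pvDIV]

theorem foldA (k : Nat) :
    (PySem.List.pyRange 4 ((k : Int) + 4) 1).foldl stepA [0, 1, 3, 10] = buildA k := by
  induction k with
  | zero => rw [PySem.List.pyRange_one_eq_nil (by norm_num)]; rfl
  | succ k ih =>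
    have hcast : ((k + 1 : Nat) : Int) + 4 = ((k : Int) + 4) + 1 := by push_cast; ring
    rw [hcast, PySem.List.pyRange_one_succ_right (by omega), List.foldl_append, ih]
    rfl

def stepB (s : Int × Int × Int × Int × Int × Int × Int × Int × Int) :
    Int × Int × Int × Int × Int × Int × Int × Int × Int :=
  let u := s.2.2.1 + s.2.2.2.1 + PySem.Int.mod (s.2.2.2.2.1 * 2) pvDIV
    + PySem.Int.mod (s.2.2.2.2.2.1 * 5) pvDIV
    + PySem.Int.mod (s.2.2.2.2.2.2.1 * 2) pvDIV - s.2.2.2.2.2.2.1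
    + PySem.Int.mod (s.2.2.2.2.2.2.2.2 * 4) pvDIV
    - PySem.Int.mod (s.2.2.2.2.2.2.2.2 * 5) pvDIV
  let d := PySem.Int.mod u pvDIV
  (u, s.1, s.2.1, d, s.2.2.2.1, s.2.2.2.2.1, s.2.2.2.2.2.1, s.2.2.2.2.2.2.1,
    s.2.2.2.2.2.2.2.1)

def iterB : Nat → Int × Int × Int × Int × Int × Int × Int × Int × Int
  | 0 => (170, 62, 23, 170, 62, 23, 10, 3, 1)
  | m + 1 => stepB (iterB m)

theorem foldB (m : Nat) :
    (PySem.List.pyRange 7 ((m : Int) + 7) 1).foldl (fun s (_ : Int) => stepB s)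
      (170, 62, 23, 170, 62, 23, 10, 3, 1) = iterB m := by
  induction m with
  | zero => rw [PySem.List.pyRange_one_eq_nil (by norm_num)]; rfl
  | succ m ih =>
    have hcast : ((m + 1 : Nat) : Int) + 7 = ((m : Int) + 7) + 1 := by push_cast; ring
    rw [hcast, PySem.List.pyRange_one_succ_right (by omega), List.foldl_append, ih]
    rfl

theorem GI_succ (j : Int) (h : 4 ≤ j) : GI j = PySem.Int.mod (Traw j) pvDIV := by
  unfold GI
  have h4 : j.toNat = (j.toNat - 4) + 4 := by omega
  rw [h4, Gn_succ]
  have : ((j.toNat - 4 : Nat) : Int) + 4 = j := by omega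
  rw [this]

theorem invB (m : Nat) : iterB m
    = (Traw ((m : Int) + 6), Traw ((m : Int) + 5), Traw ((m : Int) + 4),
       GI ((m : Int) + 6), GI ((m : Int) + 5), GI ((m : Int) + 4),
       GI ((m : Int) + 3), GI ((m : Int) + 2), GI ((m : Int) + 1)) := by
  induction m with
  | zero =>
    simp only [Nat.cast_zero, zero_add]
    unfold iterB
    simp only [Prod.mk.injEq]
    refine ⟨?_, ?_, ?_, ?_, ?_, ?_, ?_, ?_, ?_⟩ <;> decide
  | succ m ih =>
    have hu : Traw ((m : Int) + 7)
        = Traw ((m : Int) + 4) + GI ((m : Int) + 6) + PySem.Int.mod (GI ((m : Int) + 5) * 2) pvDIV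
          + PySem.Int.mod (GI ((m : Int) + 4) * 5) pvDIV
          + PySem.Int.mod (GI ((m : Int) + 3) * 2) pvDIV - GI ((m : Int) + 3)
          + PySem.Int.mod (GI ((m : Int) + 1) * 4) pvDIV
          - PySem.Int.mod (GI ((m : Int) + 1) * 5) pvDIV := by
      have := T_step ((m : Int) + 7) (by omega)
      rw [show (m : Int) + 7 - 3 = (m : Int) + 4 by ring, show (m : Int) + 7 - 1 = (m : Int) + 6 by ring,
          show (m : Int) + 7 - 2 = (m : Int) + 5 by ring, show (m : Int) + 7 - 4 = (m : Int) + 3 by ring,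
          show (m : Int) + 7 - 6 = (m : Int) + 1 by ring] at this
      rw [this]; ring
    show stepB (iterB m) = _
    rw [ih]
    unfold stepB
    simp only [Prod.mk.injEq]
    have hc : ∀ c : Int, ((m + 1 : Nat) : Int) + c = ((m : Int) + 1) + c := by
      intro c; push_cast; ring
    refine ⟨?_, ?_, ?_, ?_, ?_, ?_, ?_, ?_, ?_⟩
    · rw [hc 6, show (m : Int) + 1 + 6 = (m : Int) + 7 by ring, hu]
    · rw [hc 5]; congr 1
    · rw [hc 4]; congr 1
    · rw [hc 6, show (m : Int) + 1 + 6 = (m : Int) + 7 by ring, ← hu,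
        GI_succ ((m : Int) + 7) (by omega)]
    · rw [hc 5]; congr 1
    · rw [hc 4]; congr 1
    · rw [hc 3]; congr 1
    · rw [hc 2]; congr 1
    · rw [hc 1]; congr 1

theorem solution_tle_spec : Claim_equal_solution_tle := by
  intro n hdom hpre
  unfold Spec_solution_tle
  unfold Pre_solution_tle at hpre
  by_cases h7 : n < 7
  · interval_cases n <;> decide
  · -- n ≥ 7
    set m : Nat := (n - 7).toNat with hm
    have hmn : (m : Int) = n - 7 := by omega
    -- A side
    have hA : solution_tle n
        = PySem.Int.mod (PySem.List.pyGetD (buildA (m + 4)) (-1) 0) pvDIV := by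
      have h4 : ¬ n < 4 := by omega
      have hk : ((m + 4 : Nat) : Int) + 4 = n + 1 := by push_cast; omega
      rw [show solution_tle n
          = if n < 4 then (PySem.List.pyGet? [0, 1, 3, 10] n).getD 0
            else PySem.Int.mod (PySem.List.pyGetD
              ((PySem.List.pyRange 4 (n + 1) 1).foldl stepA [0, 1, 3, 10]) (-1) 0) pvDIV
          from rfl, if_neg h4, ← hk, foldA]
    have hlen : (buildA (m + 4)).length = m + 8 := by rw [length_buildA]
    have hne : buildA (m + 4) ≠ [] := by
      intro hc; rw [hc] at hlen; simp at hlen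
    have hlast : PySem.List.pyGetD (buildA (m + 4)) (-1) 0 = Gn (m + 7) := by
      rw [PySem.List.pyGetD_neg_one _ _ hne, List.getLast_eq_getElem,
          ← List.getD_eq_getElem _ 0, show (buildA (m + 4)).length - 1 = m + 7 by omega,
          getD_buildA (m + 4) (m + 7) (by omega)]
    -- B side
    have hB : solution_tle_alt n = GI ((m : Int) + 7) := by
      have hk : ((m + 1 : Nat) : Int) + 7 = n + 1 := by push_cast; omega
      rw [show solution_tle_alt n
          = if n < 7 then PySem.Int.mod ((PySem.List.pyGet? [0, 1, 3, 10, 23, 62, 170] n).getD 0) pvDIV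
            else ((PySem.List.pyRange 7 (n + 1) 1).foldl (fun s (_ : Int) => stepB s)
              (170, 62, 23, 170, 62, 23, 10, 3, 1)).2.2.2.1
          from rfl, if_neg h7, ← hk, foldB, invB]
      simp only []
      rw [show ((m + 1 : Nat) : Int) + 6 = (m : Int) + 7 by push_cast; ring]
    rw [hA, hlast, hB]
    unfold GI
    rw [show ((m : Int) + 7).toNat = m + 7 by omega,
        PySem.Int.mod_eq_emod_of_pos (by norm_num [pvDIV]),
        Int.emod_eq_of_lt (Gn_bounds (m + 7)).1 (Gn_bounds (m + 7)).2]
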